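-- pv_equiv track=rewrite | github.com/tinylabs/fan_controller | code16/fan433_16.py | _segments_by_long_ones
-- ===== SOURCE A (Python) =====
-- from itertools import groupby
-- from typing import List, Tuple, Optional, Dict, Iterable
--
-- def rle(bits: str) -> List[Tuple[str, int]]:
--     return [(k, len(list(g))) for k, g in groupby(bits)]
--
-- def _segments_by_long_ones(bits: str, min_ones: int) -> List[str]:
--     runs = rle(bits)
--     segs, pos, last = [], 0, 0
--     for v, l in runs:
--         if v == '1' and l >= min_ones:
--             segs.append(bits[last:pos])
--             last = pos + l
--         pos += l
--     segs.append(bits[last:])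
--     return [s for s in segs if s and s.count('1') > 0]
-- ===== SOURCE B (Python) =====
-- def _segments_by_long_ones(bits: str, min_ones: int):
--     # one left-to-right character scan: accumulate the current segment's characters
--     # and a pending run of '1's; cut when the pending run reaches m = max(min_ones, 1)
--     m = max(min_ones, 1)
--     segs, cur, ones = [], [], 0
--     for c in bits:
--         if c == '1':
--             ones += 1
--         elif ones >= m:
--             segs.append(''.join(cur))
--             cur, ones = [c], 0
--         else:
--             cur.extend('1' * ones)
--             cur.append(c)
--             ones = 0
--     if ones >= m:
--         segs.append(''.join(cur))
--     else:
--         cur.extend('1' * ones)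
--         segs.append(''.join(cur))
--     return [s for s in segs if s and '1' in s]
-- ===== Notes on version B (the rewrite author's own statement) =====
-- stated objective: faster
-- what changed: Replaced the RLE + position/slice bookkeeping (groupby, then index arithmetic with bits[last:pos] slices) by a single character-by-character scan that accumulates the current segment's characters directly while counting the pending run of ones, cutting when the run reaches max(min_ones,1). Same O(n) asymptotics; the constant-factor win comes from dropping the itertools.groupby pass, the materialised run list and the repeated string slicing.
import Mathlib
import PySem

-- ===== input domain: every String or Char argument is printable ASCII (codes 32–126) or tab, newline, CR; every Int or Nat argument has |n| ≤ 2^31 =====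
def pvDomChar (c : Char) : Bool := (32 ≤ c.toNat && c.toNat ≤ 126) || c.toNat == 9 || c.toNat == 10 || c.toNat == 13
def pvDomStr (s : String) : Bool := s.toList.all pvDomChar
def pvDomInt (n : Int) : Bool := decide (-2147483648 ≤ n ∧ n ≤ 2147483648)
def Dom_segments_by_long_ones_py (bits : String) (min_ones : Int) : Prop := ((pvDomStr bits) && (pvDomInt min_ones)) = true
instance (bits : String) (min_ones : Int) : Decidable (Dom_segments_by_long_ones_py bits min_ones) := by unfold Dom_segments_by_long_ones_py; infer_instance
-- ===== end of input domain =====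

-- B replaces A's RLE + index/slice bookkeeping with a single character scan that
-- accumulates segment text directly (same O(n); measured constant-factor faster).

-- ===== PORT A =====
-- run-length encoding over the character list: exact for itertools.groupby on a
-- string followed by len(list(g)) (maximal groups of equal adjacent characters)
def pvRle : List Char → List (Char × Nat)
  | [] => []
  | c :: cs => (c, (cs.takeWhile (· == c)).length + 1) :: pvRle (cs.dropWhile (· == c))
termination_by l => l.length
decreasing_by exact Nat.lt_succ_of_le (List.length_dropWhile_le _ _)

-- one iteration of A's for-loop; state = (segs, pos, last); the slice bits[last:pos]
-- is ported as (drop last).take (pos - last), exact here because 0 ≤ last ≤ pos always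
def pvAStep (l : List Char) (min_ones : Int) (st : List (List Char) × Nat × Nat)
    (r : Char × Nat) : List (List Char) × Nat × Nat :=
  if r.1 = '1' ∧ (r.2 : Int) ≥ min_ones then
    (st.1 ++ [(l.drop st.2.2).take (st.2.1 - st.2.2)], st.2.1 + r.2, st.2.1 + r.2)
  else (st.1, st.2.1 + r.2, st.2.2)

def segments_by_long_ones_py (bits : String) (min_ones : Int) : List String :=
  let l := bits.toList
  let st := (pvRle l).foldl (pvAStep l min_ones) ([], 0, 0)
  let segs := st.1 ++ [l.drop st.2.2]      -- segs.append(bits[last:])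
  (segs.filter (fun s => decide (s ≠ [] ∧ s.count '1' > 0))).map String.mk

-- ===== PORT B =====
-- one iteration of B's for-loop; state = (segs, cur, ones)
def pvBStep (m : Int) (st : List (List Char) × List Char × Nat) (c : Char) :
    List (List Char) × List Char × Nat :=
  if c = '1' then (st.1, st.2.1, st.2.2 + 1)
  else if (st.2.2 : Int) ≥ m then (st.1 ++ [st.2.1], [c], 0)
  else (st.1, st.2.1 ++ List.replicate st.2.2 '1' ++ [c], 0)

def segments_by_long_ones_py_alt (bits : String) (min_ones : Int) : List String :=
  let m := max min_ones 1
  let st := bits.toList.foldl (pvBStep m) ([], [], 0)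
  let segs := if (st.2.2 : Int) ≥ m then st.1 ++ [st.2.1]
              else st.1 ++ [st.2.1 ++ List.replicate st.2.2 '1']
  (segs.filter (fun s => decide (s ≠ [] ∧ '1' ∈ s))).map String.mk

-- ===== PRECONDITION & SPEC =====
def Spec_segments_by_long_ones_py (bits : String) (min_ones : Int) (out : List String) : Prop := out = segments_by_long_ones_py_alt bits min_ones
instance (bits : String) (min_ones : Int) (out : List String) : Decidable (Spec_segments_by_long_ones_py bits min_ones out) := by unfold Spec_segments_by_long_ones_py; infer_instance

-- ===== CLAIM (what is proved, stated in full; the proofs are below) =====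
def Claim_equal_segments_by_long_ones_py : Prop := ∀ (bits : String) (min_ones : Int), Dom_segments_by_long_ones_py bits min_ones → Spec_segments_by_long_ones_py bits min_ones (segments_by_long_ones_py bits min_ones)

-- ===== LEMMAS AND PROOFS =====

-- reference: segments produced run by run, with a pending count o of trailing ones
def pvSegsP (m : Int) : List (Char × Nat) → List Char → Nat → List (List Char)
  | [], cur, o => if (o : Int) ≥ m then [cur] else [cur ++ List.replicate o '1']
  | (v, k) :: rs, cur, o =>
    if v = '1' then pvSegsP m rs cur (o + k)
    else if (o : Int) ≥ m then cur :: pvSegsP m rs (List.replicate k v) 0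
    else pvSegsP m rs (cur ++ List.replicate o '1' ++ List.replicate k v) 0

def pvF (x : List (List Char)) : List (List Char) :=
  x.filter (fun s => decide (s ≠ [] ∧ s.count '1' > 0))

-- final step of A: append bits[last:]
def pvAFinal (l : List Char) (st : List (List Char) × Nat × Nat) : List (List Char) :=
  st.1 ++ [l.drop st.2.2]

-- final step of B
def pvBFinal (m : Int) (st : List (List Char) × List Char × Nat) : List (List Char) :=
  if (st.2.2 : Int) ≥ m then st.1 ++ [st.2.1]
  else st.1 ++ [st.2.1 ++ List.replicate st.2.2 '1']

theorem pvRle_head {t : List Char} {v : Char} {k : Nat} {rs : List (Char × Nat)}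
    (h : pvRle t = (v, k) :: rs) : t.head? = some v := by
  cases t <;> simp [pvRle] at h ⊢ <;> tauto

theorem pvRle_nil {t : List Char} (h : pvRle t = []) : t = [] := by
  cases t <;> simp [pvRle] at h ⊢

theorem pvRle_decomp {t : List Char} {v : Char} {k : Nat} {rs : List (Char × Nat)}
    (h : pvRle t = (v, k) :: rs) :
    1 ≤ k ∧ ∃ u, t = List.replicate k v ++ u ∧ pvRle u = rs ∧
      (∀ c, u.head? = some c → c ≠ v) := by
  cases t with
  | nil => simp [pvRle] at h
  | cons c cs =>
    simp only [pvRle, List.cons.injEq, Prod.mk.injEq] at h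
    obtain ⟨⟨hv, hk⟩, hrs⟩ := h
    subst hv
    refine ⟨by omega, cs.dropWhile (· == c), ?_, hrs, ?_⟩
    · have h1 : c :: cs.takeWhile (· == c) = List.replicate k c := by
        rw [← hk]
        have : ∀ x ∈ cs.takeWhile (· == c), x = c := by
          intro x hx
          have := List.mem_takeWhile_imp hx
          simpa using this
        simpa [List.replicate_succ] using List.eq_replicate_of_mem this
      calc c :: cs = c :: (cs.takeWhile (· == c) ++ cs.dropWhile (· == c)) := by
              rw [List.takeWhile_append_dropWhile]
        _ = List.replicate k c ++ cs.dropWhile (· == c) := by rw [← List.cons_append, h1]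
    · intro d hd hdc
      subst hdc
      -- head of dropWhile does not satisfy the predicate
      have aux : ∀ (cs' : List Char), ((cs'.dropWhile (· == d)).head?).all (fun x => !(x == d)) = true := by
        intro cs'
        induction cs' with
        | nil => simp
        | cons a l ih =>
          by_cases hp : a = d
          · simpa [hp] using ih
          · simp [hp]
      have := aux cs
      rw [hd] at this
      simp at this

theorem pv_onesFold (m : Int) (j : Nat) :
    ∀ (segs : List (List Char)) (cur : List Char) (o : Nat),
    (List.replicate j '1').foldl (pvBStep m) (segs, cur, o) = (segs, cur, o + j) := by
  induction j with
  | zero => intro segs cur o; simp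
  | succ n ih =>
    intro segs cur o
    rw [List.replicate_succ, List.foldl_cons]
    have h1 : pvBStep m (segs, cur, o) '1' = (segs, cur, o + 1) := by simp [pvBStep]
    rw [h1, ih]
    simp [Nat.add_comm, Nat.add_assoc, Nat.add_left_comm]

theorem pv_zerosFold (m : Int) (hm : 1 ≤ m) {c : Char} (hc : c ≠ '1') (j : Nat) :
    ∀ (segs : List (List Char)) (cur : List Char),
    (List.replicate j c).foldl (pvBStep m) (segs, cur, 0) = (segs, cur ++ List.replicate j c, 0) := by
  induction j with
  | zero => intro segs cur; simp
  | succ n ih =>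
    intro segs cur
    rw [List.replicate_succ, List.foldl_cons]
    have h1 : pvBStep m (segs, cur, 0) c = (segs, cur ++ [c], 0) := by
      simp only [pvBStep, if_neg hc]
      rw [if_neg (show ¬ (((0 : Nat) : Int) ≥ m) by push_cast; omega)]
      simp
    rw [h1, ih]
    simp [List.replicate_succ]

-- pending ones at a boundary (next run not ones), below threshold: fold them into cur
theorem pv_pendLow (m : Int) (hm : 1 ≤ m) (rs : List (Char × Nat)) (cur : List Char) (o : Nat)
    (h1 : ∀ v' k' rs'', rs = (v', k') :: rs'' → v' ≠ '1') (ho : ¬ ((o : Int) ≥ m)) :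
    pvSegsP m rs cur o = pvSegsP m rs (cur ++ List.replicate o '1') 0 := by
  have h0 : ¬ ((0 : Int) ≥ m) := by omega
  cases rs with
  | nil => simp [pvSegsP, ho, h0]
  | cons r rs'' =>
    obtain ⟨v', k'⟩ := r
    have hv : v' ≠ '1' := h1 v' k' rs'' rfl
    simp [pvSegsP, hv, ho, h0, List.append_assoc]

-- pending ones at a boundary, reaching the threshold: cut (modulo the filter,
-- which drops the empty segment A appends after a final qualifying run)
theorem pv_pendHigh (m : Int) (hm : 1 ≤ m) (rs : List (Char × Nat)) (cur : List Char) (o : Nat)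
    (h1 : ∀ v' k' rs'', rs = (v', k') :: rs'' → v' ≠ '1') (ho : (o : Int) ≥ m) :
    pvF (pvSegsP m rs cur o) = pvF (cur :: pvSegsP m rs [] 0) := by
  have h0 : ¬ ((0 : Int) ≥ m) := by omega
  cases rs with
  | nil => simp [pvSegsP, ho, h0, pvF, List.filter_cons]
  | cons r rs'' =>
    obtain ⟨v', k'⟩ := r
    have hv : v' ≠ '1' := h1 v' k' rs'' rfl
    simp [pvSegsP, hv, ho, h0]

-- slice bookkeeping: extending A's current slice bits[last:pos] by one full run
theorem pv_sliceExt (l : List Char) {pos last k : Nat} {v : Char} {t : List Char}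
    (hlp : last ≤ pos) (hk : 1 ≤ k) (hd : l.drop pos = List.replicate k v ++ t) :
    (l.drop last).take (pos - last) ++ List.replicate k v = (l.drop last).take (pos + k - last) := by
  have hlen : pos < l.length := by
    by_contra h
    have h0 : l.drop pos = [] := List.drop_eq_nil_of_le (by omega)
    rw [h0] at hd
    cases k with
    | zero => omega
    | succ => simp [List.replicate_succ] at hd
  have hsplit : l.drop last = (l.drop last).take (pos - last) ++ (List.replicate k v ++ t) := by
    conv_lhs => rw [← List.take_append_drop (pos - last) (l.drop last)]
    congr 1
    rw [List.drop_drop, ← hd]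
    congr 1
    omega
  have hlenA : ((l.drop last).take (pos - last)).length = pos - last := by
    simp
    omega
  conv_rhs => rw [hsplit]
  rw [List.take_append, hlenA]
  have hA : (List.take (pos - last) (List.drop last l)).take (pos + k - last) =
      List.take (pos - last) (List.drop last l) := List.take_of_length_le (by rw [hlenA]; omega)
  rw [hA]
  have hkk : pos + k - last - (pos - last) = k := by omega
  rw [hkk]
  congr 1
  rw [List.take_append]
  simp

-- A-side characterisation: the fold over the runs, with its slices, produces pvSegsP
theorem pv_LA (l : List Char) (min_ones : Int) :
    ∀ rs pos last segs, pvRle (l.drop pos) = rs → last ≤ pos →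
    pvF (pvAFinal l ((rs.foldl (pvAStep l min_ones) (segs, pos, last)))) =
    pvF (segs ++ pvSegsP (max min_ones 1) rs ((l.drop last).take (pos - last)) 0) := by
  intro rs
  induction rs with
  | nil =>
    intro pos last segs hrle hlp
    have h0 : l.drop pos = [] := pvRle_nil hrle
    have hlen : l.length ≤ pos := by
      by_contra h
      rw [List.drop_eq_nil_iff] at h0
      omega
    have htake : (l.drop last).take (pos - last) = l.drop last :=
      List.take_of_length_le (by simp; omega)
    have hm1 : ¬ (((0:Nat):Int) ≥ max min_ones 1) := by
      have := le_max_right min_ones 1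
      push_cast
      omega
    simp [pvAFinal, pvSegsP, htake, hm1]
  | cons r rs' ihr =>
    obtain ⟨v, k⟩ := r
    intro pos last segs hrle hlp
    obtain ⟨hk, u, hu, hru, hnu⟩ := pvRle_decomp hrle
    have hu' : u = l.drop (pos + k) := by
      have h1 : u = (l.drop pos).drop (List.replicate k v).length := by
        rw [hu, List.drop_left]
      rw [h1, List.drop_drop, List.length_replicate]
    have hm : (1:Int) ≤ max min_ones 1 := le_max_right min_ones 1
    have hmo : min_ones ≤ max min_ones 1 := le_max_left _ _
    have hk1 : (1:Int) ≤ ((k:Nat):Int) := by exact_mod_cast hk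
    have hrle' : pvRle (l.drop (pos + k)) = rs' := by rw [← hu']; exact hru
    rw [List.foldl_cons]
    by_cases hcond : v = '1' ∧ ((k:Nat):Int) ≥ min_ones
    · -- qualifying one-run: since k ≥ 1 this is exactly k ≥ max(min_ones,1)
      have hv : v = '1' := hcond.1
      have hkm : ((k:Nat):Int) ≥ max min_ones 1 := by
        rcases max_choice min_ones 1 with h | h <;> rw [h]
        · exact hcond.2
        · omega
      have hhead : ∀ v' k' rs'', rs' = (v', k') :: rs'' → v' ≠ '1' := by
        intro v' k' rs'' hr hv1
        have hh : u.head? = some v' := pvRle_head (by rw [hru, hr])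
        exact hnu v' hh (by rw [hv1, hv])
      have hstep : pvAStep l min_ones (segs, pos, last) (v, k) =
          (segs ++ [(l.drop last).take (pos - last)], pos + k, pos + k) := by
        simp [pvAStep, hcond]
      rw [hstep, ihr (pos + k) (pos + k) _ hrle' le_rfl]
      rw [Nat.sub_self, List.take_zero]
      have hs : pvSegsP (max min_ones 1) ((v, k) :: rs')
          ((l.drop last).take (pos - last)) 0 =
          pvSegsP (max min_ones 1) rs' ((l.drop last).take (pos - last)) (0 + k) := by
        simp [pvSegsP, hv]
      rw [hs, Nat.zero_add]
      have hph := pv_pendHigh (max min_ones 1) hm rs' ((l.drop last).take (pos - last)) k hhead hkm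
      rw [show ((l.drop last).take (pos - last)) :: pvSegsP (max min_ones 1) rs' [] 0 =
        [(l.drop last).take (pos - last)] ++ pvSegsP (max min_ones 1) rs' [] 0 from rfl] at hph
      simp only [pvF, List.filter_append] at hph ⊢
      rw [hph, List.append_assoc]
    · -- non-qualifying run: A only advances pos
      have hstep : pvAStep l min_ones (segs, pos, last) (v, k) = (segs, pos + k, last) := by
        simp [pvAStep, hcond]
      rw [hstep, ihr (pos + k) last segs hrle' (by omega)]
      by_cases hv : v = '1'
      · -- short one-run: fold it into the pending slice
        have hkm : ¬ (((k:Nat):Int) ≥ max min_ones 1) := by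
          intro hge
          exact hcond ⟨hv, by omega⟩
        have hhead : ∀ v' k' rs'', rs' = (v', k') :: rs'' → v' ≠ '1' := by
          intro v' k' rs'' hr hv1
          have hh : u.head? = some v' := pvRle_head (by rw [hru, hr])
          exact hnu v' hh (by rw [hv1, hv])
        have hs : pvSegsP (max min_ones 1) ((v, k) :: rs')
            ((l.drop last).take (pos - last)) 0 =
            pvSegsP (max min_ones 1) rs' ((l.drop last).take (pos - last)) (0 + k) := by
          simp [pvSegsP, hv]
        rw [hs, Nat.zero_add, pv_pendLow (max min_ones 1) hm rs' _ k hhead hkm]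
        rw [pv_sliceExt l hlp hk (hv ▸ hu' ▸ hu)]
      · -- non-one run: append it to the pending slice
        have h0 : ¬ (((0:Nat):Int) ≥ max min_ones 1) := by push_cast; omega
        have hs : pvSegsP (max min_ones 1) ((v, k) :: rs')
            ((l.drop last).take (pos - last)) 0 =
            pvSegsP (max min_ones 1) rs' ((l.drop last).take (pos - last) ++ List.replicate k v) 0 := by
          simp [pvSegsP, hv, h0]
        rw [hs, pv_sliceExt l hlp hk (hu' ▸ hu)]

-- B-side characterisation: the character fold produces pvSegsP (raw equality)
theorem pv_LB (m : Int) (hm : 1 ≤ m) :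
    ∀ n (l : List Char) rs segs cur o, l.length ≤ n → pvRle l = rs →
    (∀ c, l.head? = some c → c ≠ '1') →
    pvBFinal m (l.foldl (pvBStep m) (segs, cur, o)) = segs ++ pvSegsP m rs cur o := by
  intro n
  induction n with
  | zero =>
    intro l rs segs cur o hn hrle hhead
    have hl : l = [] := by cases l <;> simp at hn ⊢
    subst hl
    rw [← hrle]
    by_cases ho : ((o:Nat):Int) ≥ m <;> simp [pvRle, pvBFinal, pvSegsP, ho]
  | succ n ihn =>
    intro l rs segs cur o hn hrle hhead
    cases l with
    | nil =>
      rw [← hrle]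
      by_cases ho : ((o:Nat):Int) ≥ m <;> simp [pvRle, pvBFinal, pvSegsP, ho]
    | cons c cs =>
      have hc : c ≠ '1' := hhead c rfl
      subst hrle
      have heq : pvRle (c :: cs) =
          (c, (cs.takeWhile (· == c)).length + 1) :: pvRle (cs.dropWhile (· == c)) := by
        rw [pvRle]
      obtain ⟨hk, u, hu, hru, hnu⟩ := pvRle_decomp heq
      have hulen : u.length ≤ n := by
        have h1 := congrArg List.length hu
        have hn' : cs.length + 1 ≤ n + 1 := by simpa using hn
        simp at h1
        omega
      -- fold over the first (non-one) run: flush pending ones once, then append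
      have hrun : ∀ (S : List (List Char)) (C : List Char),
          (List.replicate ((cs.takeWhile (· == c)).length + 1) c).foldl (pvBStep m) (S, C, o) =
          (if ((o:Nat):Int) ≥ m then
            (S ++ [C], List.replicate ((cs.takeWhile (· == c)).length + 1) c, 0)
           else
            (S, C ++ List.replicate o '1' ++ List.replicate ((cs.takeWhile (· == c)).length + 1) c, 0)) := by
        intro S C
        rw [List.replicate_succ, List.foldl_cons]
        by_cases ho : ((o:Nat):Int) ≥ m
        · rw [show pvBStep m (S, C, o) c = (S ++ [C], [c], 0) by simp [pvBStep, hc, ho]]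
          rw [pv_zerosFold m hm hc]
          simp [ho, List.replicate_succ]
        · rw [show pvBStep m (S, C, o) c = (S, C ++ List.replicate o '1' ++ [c], 0) by
            simp [pvBStep, hc, ho]]
          rw [pv_zerosFold m hm hc]
          simp [ho, List.replicate_succ]
      -- continue past that run
      have hcont : ∀ (S : List (List Char)) (C : List Char),
          pvBFinal m (u.foldl (pvBStep m) (S, C, 0)) = S ++ pvSegsP m (pvRle u) C 0 := by
        intro S C
        rcases hu2 : u with _ | ⟨d, ds⟩
        · simp [pvRle, pvBFinal, pvSegsP, show ¬ (((0:Nat):Int) ≥ m) by push_cast; omega]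
        · by_cases hd : d = '1'
          · subst hd
            have heq2 : pvRle ('1' :: ds) =
                ('1', (ds.takeWhile (· == '1')).length + 1) :: pvRle (ds.dropWhile (· == '1')) := by
              rw [pvRle]
            obtain ⟨hj, w, hw, hrw, hnw⟩ := pvRle_decomp heq2
            have hwlen : w.length ≤ n := by
              have h1 := congrArg List.length hw
              have h2 := congrArg List.length hu2
              simp at h1 h2
              omega
            rw [hw, List.foldl_append, pv_onesFold]
            rw [ihn w _ S C _ hwlen rfl (fun c' hc' h1 => hnw c' hc' h1)]
            conv_rhs => rw [← hw, heq2]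
            simp [pvSegsP, hrw]
          · refine ihn (d :: ds) (pvRle (d :: ds)) S C 0 (hu2 ▸ hulen) rfl ?_
            intro c' hc'
            simp at hc'
            rw [← hc']
            exact hd
      conv_lhs => rw [hu]
      rw [List.foldl_append, hrun, heq]
      by_cases ho : ((o:Nat):Int) ≥ m
      · rw [if_pos ho, hcont, hru]
        simp [pvSegsP, hc, ho]
      · rw [if_neg ho, hcont, hru]
        simp [pvSegsP, hc, ho, List.append_assoc]

theorem pv_LB_top (m : Int) (hm : 1 ≤ m) (l : List Char) :
    pvBFinal m (l.foldl (pvBStep m) ([], [], 0)) = pvSegsP m (pvRle l) [] 0 := by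
  rcases hl : l with _ | ⟨c, cs⟩
  · simp [pvRle, pvBFinal, pvSegsP, show ¬ (((0:Nat):Int) ≥ m) by push_cast; omega]
  · by_cases hc : c = '1'
    · subst hc
      have heq : pvRle ('1' :: cs) =
          ('1', (cs.takeWhile (· == '1')).length + 1) :: pvRle (cs.dropWhile (· == '1')) := by
        rw [pvRle]
      obtain ⟨hk, u, hu, hru, hnu⟩ := pvRle_decomp heq
      rw [hu, List.foldl_append, pv_onesFold]
      rw [pv_LB m hm u.length u (pvRle u) [] [] _ le_rfl rfl
        (fun c' hc' h1 => hnu c' hc' h1)]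
      conv_rhs => rw [← hu, heq]
      simp [pvSegsP, hru]
    · exact pv_LB m hm (c :: cs).length (c :: cs) _ [] [] 0 le_rfl rfl
        (fun c' hc' => by simp at hc'; rw [← hc']; exact hc)

-- ===== VERDICT (by name: the statement is the Claim_ definition above) =====
theorem segments_by_long_ones_py_spec : Claim_equal_segments_by_long_ones_py := by
  intro bits min_ones _
  show segments_by_long_ones_py bits min_ones = segments_by_long_ones_py_alt bits min_ones
  have hm : (1:Int) ≤ max min_ones 1 := le_max_right min_ones 1
  have hA : segments_by_long_ones_py bits min_ones =
      (pvF (pvAFinal bits.toList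
        ((pvRle bits.toList).foldl (pvAStep bits.toList min_ones) ([], 0, 0)))).map String.mk := rfl
  have hB : segments_by_long_ones_py_alt bits min_ones =
      ((pvBFinal (max min_ones 1)
          (bits.toList.foldl (pvBStep (max min_ones 1)) ([], [], 0))).filter
        (fun s => decide (s ≠ [] ∧ '1' ∈ s))).map String.mk := rfl
  rw [hA, hB, pv_LB_top (max min_ones 1) hm bits.toList]
  rw [pv_LA bits.toList min_ones (pvRle bits.toList) 0 0 [] (by rw [List.drop_zero]) le_rfl]
  have hpred : ∀ s : List Char,
      (decide (s ≠ [] ∧ s.count '1' > 0)) = (decide (s ≠ [] ∧ '1' ∈ s)) := by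
    intro s
    simp [List.count_pos_iff]
  congr 1
  rw [show ((bits.toList.drop 0).take (0 - 0)) = [] by simp]
  show pvF (pvSegsP (max min_ones 1) (pvRle bits.toList) [] 0) =
    (pvSegsP (max min_ones 1) (pvRle bits.toList) [] 0).filter (fun s => decide (s ≠ [] ∧ '1' ∈ s))
  unfold pvF
  exact List.filter_congr (fun s _ => hpred s)
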